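-- pv_equiv track=rewrite | github.com/pah8p/Project-Euler | problem_57.py | k
-- ===== SOURCE A (Python) =====
-- def a(n):
--     if n == 0:
--         return 1
--     else:
--         return 2
--
-- K = {}
--
-- def k(n):
--     try:
--         return K[n]
--     except KeyError:
--         if n == 0:
--             _k = 1
--         elif n == 1:
--             _k = a(1)
--         else:
--             _k = a(n)*k(n-1) + k(n-2)
--
--         K[n] = _k
--         return _k
-- ===== SOURCE B (Python) =====
-- def k(n):
--     if n == 0:
--         return 1
--     prev, prevprev = 2, 1
--     for _ in range(2, n + 1):
--         prev, prevprev = 2 * prev + prevprev, prev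
--     return prev
-- ===== Notes on version B (the rewrite author's own statement) =====
-- stated objective: faster
-- what changed: Replaced the memoized top-down double recursion (global cache K) with a bottom-up loop keeping only the last two values; a(n) is inlined as the constant 2 for n>=1.
import Mathlib
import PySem

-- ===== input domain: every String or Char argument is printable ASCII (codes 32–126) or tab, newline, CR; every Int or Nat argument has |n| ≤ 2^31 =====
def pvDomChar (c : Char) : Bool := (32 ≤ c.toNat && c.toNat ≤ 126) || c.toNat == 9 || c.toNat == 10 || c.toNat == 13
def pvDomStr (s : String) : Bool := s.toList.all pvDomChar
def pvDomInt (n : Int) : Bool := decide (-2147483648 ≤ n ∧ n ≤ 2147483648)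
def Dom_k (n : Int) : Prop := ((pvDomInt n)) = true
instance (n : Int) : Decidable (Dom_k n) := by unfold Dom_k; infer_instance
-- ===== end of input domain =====

-- B replaces A's memoized top-down recursion with a bottom-up two-variable loop (no cache, no recursion).

-- ===== PORT A =====
-- Python's a(n): 1 if n == 0 else 2
def pyA (n : Int) : Int := if n = 0 then 1 else 2

-- A's memoized recursion: the global cache K is threaded through as a PySem.Dict
-- ('try: return K[n] / except KeyError:' = the get? match); n as a Nat (Pre_ gives 0 ≤ n).
def kA : Nat → PySem.Dict Int Int → Int × PySem.Dict Int Int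
  | n, K =>
    match K.get? (n : Int) with
    | some v => (v, K)
    | none =>
      match n with
      | 0 => (1, K.insert 0 1)
      | 1 => (pyA 1, K.insert 1 (pyA 1))
      | (m + 2) =>
        let r1 := kA (m + 1) K
        let r2 := kA m r1.2
        let v := pyA ((m : Int) + 2) * r1.1 + r2.1
        (v, r2.2.insert ((m : Int) + 2) v)

def k (n : Int) : Int := (kA n.toNat PySem.Dict.empty).1

-- ===== PORT B =====
-- the for-loop of Source B: each iteration maps (prev, prevprev) to (2*prev + prevprev, prev)
def loopB : Nat → Int × Int → Int × Int
  | 0, s => s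
  | (m + 1), (p, pp) => loopB m (2 * p + pp, p)

def k_alt (n : Int) : Int :=
  if n = 0 then 1
  else (loopB (n + 1 - 2).toNat (2, 1)).1

-- ===== PRECONDITION & SPEC =====
-- Pre_ excludes n < 0, where Python A recurses without reaching a base case (RecursionError).
def Pre_k (n : Int) : Prop := 0 ≤ n
instance (n : Int) : Decidable (Pre_k n) := by unfold Pre_k; infer_instance
def pvWitness_k : Int := 5

def Spec_k (n : Int) (out : Int) : Prop := out = k_alt n
instance (n : Int) (out : Int) : Decidable (Spec_k n out) := by unfold Spec_k; infer_instance

-- ===== CLAIM (what is proved, stated in full; the proofs are below) =====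
def Claim_equal_k : Prop := ∀ (n : Int), Dom_k n → Pre_k n → Spec_k n (k n)

-- ===== LEMMAS AND PROOFS =====

-- the mathematical recurrence both ports compute
def kRef : Nat → Int
  | 0 => 1
  | 1 => 2
  | (n + 2) => 2 * kRef (n + 1) + kRef n

-- cache invariant: every entry of K is a correct, non-negative-keyed value of the recurrence
def GoodK (K : PySem.Dict Int Int) : Prop :=
  ∀ (j : Int) (v : Int), K.get? j = some v → 0 ≤ j ∧ v = kRef j.toNat

theorem goodK_empty : GoodK PySem.Dict.empty := by
  intro j v h
  simp [PySem.Dict.get?_empty] at h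

theorem goodK_insert {K : PySem.Dict Int Int} (hK : GoodK K) (n : Nat) :
    GoodK (K.insert (n : Int) (kRef n)) := by
  intro j v h
  rw [PySem.Dict.get?_insert] at h
  by_cases hj : j = (n : Int)
  · rw [if_pos hj] at h
    refine ⟨by omega, ?_⟩
    cases h
    simp [hj]
  · rw [if_neg hj] at h
    exact hK j v h

-- memoized A computes the recurrence and preserves the invariant
theorem kA_correct : ∀ (n : Nat) (K : PySem.Dict Int Int), GoodK K →
    (kA n K).1 = kRef n ∧ GoodK (kA n K).2 := by
  intro n
  induction n using Nat.strong_induction_on with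
  | _ n ih =>
    intro K hK
    rw [kA.eq_def]
    cases hget : K.get? (n : Int) with
    | some v =>
      simp only [hget]
      have hv := (hK _ _ hget).2
      simp only [Int.toNat_natCast] at hv
      exact ⟨hv, hK⟩
    | none =>
      simp only [hget]
      match n with
      | 0 =>
        refine ⟨rfl, ?_⟩
        have := goodK_insert hK 0
        simpa [kRef] using this
      | 1 =>
        refine ⟨rfl, ?_⟩
        have := goodK_insert hK 1
        simpa [kRef, pyA] using this
      | (m + 2) =>
        have h1 := ih (m + 1) (by omega) K hK
        have h2 := ih m (by omega) (kA (m + 1) K).2 h1.2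
        have hv : pyA ((m : Int) + 2) * (kA (m + 1) K).1 + (kA m (kA (m + 1) K).2).1
            = kRef (m + 2) := by
          rw [h1.1, h2.1, kRef]
          have : pyA ((m : Int) + 2) = 2 := by unfold pyA; rw [if_neg (by omega)]
          rw [this]
        refine ⟨hv, ?_⟩
        have hg := goodK_insert h2.2 (m + 2)
        rw [kRef] at hg
        rw [← h1.1, ← h2.1] at hg
        have : (2 : Int) * (kA (m + 1) K).1 + (kA m (kA (m + 1) K).2).1
            = pyA ((m : Int) + 2) * (kA (m + 1) K).1 + (kA m (kA (m + 1) K).2).1 := by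
          have hp : pyA ((m : Int) + 2) = 2 := by unfold pyA; rw [if_neg (by omega)]
          rw [hp]
        rw [this] at hg
        simpa using hg

-- loop invariant for B: starting from two consecutive values, m iterations advance by m
theorem loopB_kRef (m j : Nat) :
    loopB m (kRef (j + 1), kRef j) = (kRef (m + j + 1), kRef (m + j)) := by
  induction m generalizing j with
  | zero => simp [loopB]
  | succ m ih =>
    have h : (2 : Int) * kRef (j + 1) + kRef j = kRef (j + 2) := by rw [kRef]
    calc loopB (m + 1) (kRef (j + 1), kRef j)
        = loopB m (kRef (j + 2), kRef (j + 1)) := by simp [loopB, h]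
      _ = (kRef (m + (j + 1) + 1), kRef (m + (j + 1))) := ih (j + 1)
      _ = (kRef (m + 1 + j + 1), kRef (m + 1 + j)) := by ring_nf

-- ===== VERDICT (by name: the statement is the Claim_ definition above) =====
theorem k_spec : Claim_equal_k := by
  intro n _ hn
  unfold Pre_k at hn
  unfold Spec_k k k_alt
  have hA := (kA_correct n.toNat PySem.Dict.empty goodK_empty).1
  rw [hA]
  by_cases h0 : n = 0
  · simp [h0, kRef]
  · have h1 : 1 ≤ n := by omega
    have hm : (n + 1 - 2).toNat = n.toNat - 1 := by omega
    have hk1 : kRef 1 = 2 := rfl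
    have hk0 : kRef 0 = 1 := rfl
    rw [if_neg h0, hm]
    have := loopB_kRef (n.toNat - 1) 0
    rw [hk1, hk0] at this
    rw [this]
    congr 1
    omega
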